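-- pv_equiv track=rewrite | github.com/noahbadner/ProjectEuler | problem_015.py | _check_dimensions
-- ===== SOURCE A (Python) =====
-- def _check_dimensions(x, y, solved_shapes):
--     """Helper function to recursively calculate the number of routes for the given dimensions x and y"""
--     if (x, y) in solved_shapes.keys():
--         return solved_shapes[(x, y)]
--     elif (y, x) in solved_shapes.keys():
--         return solved_shapes[(y, x)]
--     elif x == 1:
--         solved_shapes[(x, y)] = y + 1
--         return y + 1
--     elif y == 1:
--         solved_shapes[(x, y)] = x + 1
--         return x + 1
--     else:
--         solved_shapes[(x, y)] = _check_dimensions(x-1, y, solved_shapes) + _check_dimensions(x, y-1, solved_shapes)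
--         return solved_shapes[(x, y)]
-- ===== SOURCE B (Python) =====
-- def _check_dimensions(x, y, solved_shapes):
--     """Number of lattice routes through an x*y grid: the binomial coefficient
--     C(x+y, min(x,y)) computed by the multiplicative formula in O(min(x,y)).
--     (Unlike A, does not read or mutate the memo dict solved_shapes.)"""
--     n = x + y
--     k = min(x, y)
--     r = 1
--     for i in range(1, k + 1):
--         r = r * (n - k + i) // i
--     return r
-- ===== Notes on version B (the rewrite author's own statement) =====
-- stated objective: faster
-- what changed: Replaces A's memoized recursive Pascal-style recursion (which fills the solved_shapes dict) by the direct multiplicative binomial coefficient C(x+y, min(x,y)) computed in one loop of min(x,y) exact divisions.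
-- outside the precondition, e.g. on _check_dimensions(2, 2, {(1, 2): 99}): A returns 198, B returns 6; on _check_dimensions(0, 3, {}): A raises RecursionError, B returns 1
import Mathlib
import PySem

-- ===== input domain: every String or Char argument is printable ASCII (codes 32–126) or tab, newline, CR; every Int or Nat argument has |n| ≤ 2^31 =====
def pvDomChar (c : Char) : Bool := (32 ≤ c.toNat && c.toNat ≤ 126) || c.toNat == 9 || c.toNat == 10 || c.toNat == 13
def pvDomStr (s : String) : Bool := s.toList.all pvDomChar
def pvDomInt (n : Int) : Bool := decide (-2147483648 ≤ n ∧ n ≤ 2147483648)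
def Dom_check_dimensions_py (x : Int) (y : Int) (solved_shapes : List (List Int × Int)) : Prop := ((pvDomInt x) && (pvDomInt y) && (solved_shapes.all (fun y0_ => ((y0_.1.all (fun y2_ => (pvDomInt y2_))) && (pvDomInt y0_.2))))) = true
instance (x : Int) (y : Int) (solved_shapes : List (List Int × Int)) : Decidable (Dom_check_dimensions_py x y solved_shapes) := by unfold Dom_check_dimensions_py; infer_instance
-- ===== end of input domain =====

-- B replaces A's memoized two-argument recursion by the direct multiplicative binomial
-- coefficient C(x+y, min(x,y)); A mutates the memo dict solved_shapes in place and B does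
-- not: the equivalence proved here is about the RETURN value only.

-- ===== PORT A =====
-- A's recursion terminates on the admitted inputs; the fuel ((x+y).toNat at the top call)
-- is only a totality guard, proved sufficient under Pre_.
def pvGoA (fuel : Nat) (x : Int) (y : Int) (d : PySem.Dict (List Int) Int) :
    Int × PySem.Dict (List Int) Int :=
  match fuel with
  | 0 => (0, d)
  | fuel + 1 =>
    match d.get? [x, y] with
    | some v => (v, d)
    | none =>
      match d.get? [y, x] with
      | some v => (v, d)
      | none =>
        if x = 1 then (y + 1, d.insert [x, y] (y + 1))
        else if y = 1 then (x + 1, d.insert [x, y] (x + 1))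
        else
          let r1 := pvGoA fuel (x - 1) y d
          let r2 := pvGoA fuel x (y - 1) r1.2
          (r1.1 + r2.1, r2.2.insert [x, y] (r1.1 + r2.1))

def check_dimensions_py (x : Int) (y : Int) (solved_shapes : List (List Int × Int)) : Int :=
  (pvGoA (x + y).toNat x y (PySem.Dict.mk solved_shapes)).1

-- ===== PORT B =====
def check_dimensions_py_alt (x : Int) (y : Int) (solved_shapes : List (List Int × Int)) : Int :=
  let n := x + y
  let k := min x y
  (PySem.List.pyRange 1 (k + 1) 1).foldl (fun r i => PySem.Int.floordiv (r * (n - k + i)) i) 1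

-- ===== PRECONDITION & SPEC =====
-- the intended value of a memo entry keyed [a,b]: the binomial coefficient C(a+b, a)
def pvC (a : Int) (b : Int) : Int := ((a.toNat + b.toNat).choose a.toNat : Int)

def pvEntryOK (X : Int) (Y : Int) (p : List Int × Int) : Bool :=
  match p.1 with
  | [a, b] =>
    if 1 ≤ a ∧ 1 ≤ b ∧ ((a ≤ X ∧ b ≤ Y) ∨ (a ≤ Y ∧ b ≤ X)) then p.2 == pvC a b
    else true
  | _ => true

-- Pre_ excludes x < 1 or y < 1 (A recurses without reaching a base case: RecursionError)
-- and memo dicts holding a wrong value at a key [a,b] the recursion from (x,y) can consult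
-- (1 ≤ a, 1 ≤ b, components within the dimensions): A then propagates the stale cached
-- value, an artefact of the cache, not a value of the counting function.
def Pre_check_dimensions_py (x : Int) (y : Int) (solved_shapes : List (List Int × Int)) : Prop :=
  1 ≤ x ∧ 1 ≤ y ∧ solved_shapes.all (pvEntryOK x y) = true
instance (x : Int) (y : Int) (solved_shapes : List (List Int × Int)) : Decidable (Pre_check_dimensions_py x y solved_shapes) := by unfold Pre_check_dimensions_py; infer_instance

def pvWitness_check_dimensions_py : Int × Int × (List (List Int × Int)) := (3, 2, [([1, 2], 3)])

def Spec_check_dimensions_py (x : Int) (y : Int) (solved_shapes : List (List Int × Int)) (out : Int) : Prop := out = check_dimensions_py_alt x y solved_shapes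
instance (x : Int) (y : Int) (solved_shapes : List (List Int × Int)) (out : Int) : Decidable (Spec_check_dimensions_py x y solved_shapes out) := by unfold Spec_check_dimensions_py; infer_instance

-- ===== CLAIM (what is proved, stated in full; the proofs are below) =====
def Claim_equal_check_dimensions_py : Prop := ∀ (x : Int) (y : Int) (solved_shapes : List (List Int × Int)), Dom_check_dimensions_py x y solved_shapes → Pre_check_dimensions_py x y solved_shapes → Spec_check_dimensions_py x y solved_shapes (check_dimensions_py x y solved_shapes)

-- ===== LEMMAS AND PROOFS =====

theorem pvC_symm (a b : Int) : pvC a b = pvC b a := by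
  unfold pvC
  rw [Nat.add_comm]
  congr 1
  rw [← Nat.choose_symm (Nat.le_add_left _ _)]
  congr 1
  omega

-- a memo dict correct at every key the recursion from inside the X×Y box can consult
def pvGood (X : Int) (Y : Int) (d : PySem.Dict (List Int) Int) : Prop :=
  ∀ (a b : Int), 1 ≤ a → 1 ≤ b → ((a ≤ X ∧ b ≤ Y) ∨ (a ≤ Y ∧ b ≤ X)) →
    ∀ v, d.get? [a, b] = some v → v = pvC a b

theorem pvGood_insert {X Y : Int} {d : PySem.Dict (List Int) Int} {x y v : Int}
    (hd : pvGood X Y d) (hv : v = pvC x y) : pvGood X Y (d.insert [x, y] v) := by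
  intro a b ha hb hbox w hw
  rw [PySem.Dict.get?_insert] at hw
  by_cases h : ([a, b] : List Int) = [x, y]
  · rw [if_pos h] at hw
    injection h with h1 h2
    injection h2 with h2 _
    subst h1; subst h2
    injection hw with h
    exact h ▸ hv
  · rw [if_neg h] at hw
    exact hd a b ha hb hbox w hw

-- A's recursion returns pvC x y and keeps the memo consistent
theorem pvGoA_spec (fuel : Nat) : ∀ (x y X Y : Int) (d : PySem.Dict (List Int) Int),
    pvGood X Y d → 1 ≤ x → 1 ≤ y → x ≤ X → y ≤ Y → (x + y).toNat ≤ fuel →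
    (pvGoA fuel x y d).1 = pvC x y ∧ pvGood X Y (pvGoA fuel x y d).2 := by
  induction fuel with
  | zero => intro x y X Y d _ hx hy _ _ hf; omega
  | succ fuel ih =>
    intro x y X Y d hd hx hy hxX hyY hf
    rw [pvGoA]
    cases h1 : d.get? [x, y] with
    | some v => exact ⟨hd x y hx hy (Or.inl ⟨hxX, hyY⟩) v h1, hd⟩
    | none =>
      cases h2 : d.get? [y, x] with
      | some v => exact ⟨(hd y x hy hx (Or.inr ⟨hyY, hxX⟩) v h2).trans (pvC_symm y x), hd⟩
      | none =>
        by_cases hx1 : x = 1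
        · subst hx1
          rw [if_pos rfl]
          have hv : y + 1 = pvC 1 y := by
            unfold pvC
            have h1' : (1 : Int).toNat = 1 := rfl
            rw [h1', Nat.choose_one_right]
            omega
          exact ⟨hv, pvGood_insert hd hv⟩
        · rw [if_neg hx1]
          by_cases hy1 : y = 1
          · subst hy1
            rw [if_pos rfl]
            have hv : x + 1 = pvC x 1 := by
              unfold pvC
              have h1' : (1 : Int).toNat = 1 := rfl
              rw [h1', Nat.choose_succ_self_right]
              omega
            exact ⟨hv, pvGood_insert hd hv⟩
          · rw [if_neg hy1]
            obtain ⟨ha, hd1⟩ := ih (x - 1) y X Y d hd (by omega) hy (by omega) hyY (by omega)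
            obtain ⟨hb, hd2⟩ := ih x (y - 1) X Y _ hd1 hx (by omega) hxX (by omega) (by omega)
            have hv : (pvGoA fuel (x - 1) y d).1 +
                (pvGoA fuel x (y - 1) (pvGoA fuel (x - 1) y d).2).1 = pvC x y := by
              rw [ha, hb]
              unfold pvC
              rw [← Int.natCast_add]
              congr 1
              obtain ⟨p, hp⟩ : ∃ p, x.toNat = p + 1 := ⟨x.toNat - 1, by omega⟩
              obtain ⟨q, hq⟩ : ∃ q, y.toNat = q + 1 := ⟨y.toNat - 1, by omega⟩
              have e1 : (x - 1).toNat = p := by omega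
              have e2 : (y - 1).toNat = q := by omega
              rw [e1, e2, hp, hq]
              rw [show p + 1 + (q + 1) = (p + (q + 1)) + 1 from by omega,
                  Nat.choose_succ_succ,
                  show p + (q + 1) = p + 1 + q from by omega]
            exact ⟨hv, pvGood_insert hd2 hv⟩

-- B's product loop computes the binomial coefficient C(c + j, j)
theorem pvLoop (c : Int) (hc : 0 ≤ c) (j : Nat) :
    ((List.range j).map (fun t : Nat => (1 : Int) + (t : Int))).foldl
      (fun r i => PySem.Int.floordiv (r * (c + i)) i) 1
    = ((c.toNat + j).choose j : Int) := by
  obtain ⟨m, rfl⟩ : ∃ m : Nat, c = (m : Int) := ⟨c.toNat, by omega⟩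
  simp only [Int.toNat_natCast]
  induction j with
  | zero => simp
  | succ j ih =>
    rw [List.range_succ, List.map_append, List.foldl_append]
    simp only [List.map_cons, List.map_nil, List.foldl_cons, List.foldl_nil]
    rw [ih]
    have hpos : (0 : Int) < 1 + j := by positivity
    rw [PySem.Int.floordiv_eq_ediv_of_pos hpos]
    have key : ((m + j).choose j : Int) * ((m : Int) + (1 + j))
        = ((m + (j + 1)).choose (j + 1) : Int) * (1 + j) := by
      have h := Nat.add_one_mul_choose_eq (m + j) j
      rw [show m + (j + 1) = m + j + 1 from rfl]
      have hn : (m + j).choose j * (m + (1 + j)) = (m + j + 1).choose (j + 1) * (1 + j) := by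
        rw [show m + (1 + j) = m + j + 1 from by omega, Nat.mul_comm,
          show 1 + j = j + 1 from by omega]
        exact h
      exact_mod_cast hn
    rw [key, Int.mul_ediv_cancel _ (by positivity)]

theorem alt_eq_pvC (x y : Int) (hx : 1 ≤ x) (hy : 1 ≤ y)
    (l : List (List Int × Int)) : check_dimensions_py_alt x y l = pvC x y := by
  simp only [check_dimensions_py_alt]
  rw [PySem.List.pyRange_one]
  have e : (min x y + 1 - 1).toNat = (min x y).toNat := by omega
  rw [e]
  have hc : (0 : Int) ≤ x + y - min x y := by omega
  have := pvLoop (x + y - min x y) hc (min x y).toNat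
  rw [this]
  unfold pvC
  rcases le_total x y with h | h
  · rw [min_eq_left h, show (x + y - x).toNat = y.toNat from by omega,
      Nat.add_comm y.toNat]
  · rw [min_eq_right h, show (x + y - y).toNat = x.toNat from by omega,
      ← Nat.choose_symm (show x.toNat ≤ x.toNat + y.toNat from by omega),
      show x.toNat + y.toNat - x.toNat = y.toNat from by omega]

-- ===== VERDICT (by name: the statement is the Claim_ definition above) =====
theorem check_dimensions_py_spec : Claim_equal_check_dimensions_py := by
  intro x y l _ hpre
  obtain ⟨hx, hy, hall⟩ := hpre
  unfold Spec_check_dimensions_py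
  have hgood : pvGood x y (PySem.Dict.mk l) := by
    intro a b ha hb hbox v hv
    have hmem : ([a, b], v) ∈ (PySem.Dict.mk l).items :=
      PySem.Dict.mem_items_of_get?_eq_some _ hv
    have hok := List.all_eq_true.mp hall _ hmem
    simp only [pvEntryOK] at hok
    rw [if_pos ⟨ha, hb, hbox⟩] at hok
    exact eq_of_beq hok
  have h := pvGoA_spec (x + y).toNat x y x y _ hgood hx hy le_rfl le_rfl le_rfl
  unfold check_dimensions_py
  rw [h.1, alt_eq_pvC x y hx hy l]
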